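-- pv_equiv track=rewrite | github.com/kangbin17/COS-Pro-2nd-Python | day 2.py | attack_monster
-- ===== SOURCE A (Python) =====
-- def attack_monster(attack, recovery, hp):
--     count = 0
--     while(True):
--         count += 1
--         hp -= attack
--         if hp <= 0: # 0이 되는 순간 즉시 탈출!
--             break
--         hp += recovery
--     return count
-- ===== SOURCE B (Python) =====
-- def attack_monster(attack, recovery, hp):
--     # Closed form: one attack kills if hp <= attack; otherwise each further
--     # round removes a net (attack - recovery) hp, so the count is
--     # 1 + ceil((hp - attack) / (attack - recovery)), written with floor division.
--     if hp <= attack: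
--         return 1
--     return 1 - (attack - hp) // (attack - recovery)
-- ===== Notes on version B (the rewrite author's own statement) =====
-- stated objective: simpler
-- what changed: Replaces the round-by-round simulation loop with the closed-form count 1 + ceil((hp-attack)/(attack-recovery)) computed by one floor division.
import Mathlib
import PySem

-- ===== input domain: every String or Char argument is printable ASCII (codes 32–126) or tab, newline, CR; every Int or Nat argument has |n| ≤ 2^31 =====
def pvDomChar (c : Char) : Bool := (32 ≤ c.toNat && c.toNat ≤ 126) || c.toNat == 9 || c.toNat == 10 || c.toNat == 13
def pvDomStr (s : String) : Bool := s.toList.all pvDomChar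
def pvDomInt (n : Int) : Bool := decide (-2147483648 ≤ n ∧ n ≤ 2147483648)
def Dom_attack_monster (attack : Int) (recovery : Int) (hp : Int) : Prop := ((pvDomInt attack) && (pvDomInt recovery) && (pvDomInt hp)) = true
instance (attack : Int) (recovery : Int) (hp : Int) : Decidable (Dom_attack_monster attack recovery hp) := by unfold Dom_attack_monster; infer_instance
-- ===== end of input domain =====

-- B replaces A's round-by-round simulation loop with the closed-form count
-- 1 + ceil((hp-attack)/(attack-recovery)) via one floor division (objective: simpler).

-- ===== PORT A =====
-- A's while-True loop; the Nat fuel only makes the recursion total — under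
-- Pre_attack_monster the fuel given below is never exhausted (proved in the lemmas).
def attackLoopA (attack : Int) (recovery : Int) : Nat → Int → Int → Int
  | 0, count, _ => count
  | n + 1, count, hp =>
    let count := count + 1
    let hp := hp - attack
    if hp ≤ 0 then count
    else attackLoopA attack recovery n count (hp + recovery)

def attack_monster (attack : Int) (recovery : Int) (hp : Int) : Int :=
  attackLoopA attack recovery (hp.natAbs + attack.natAbs + 2) 0 hp

-- ===== PORT B =====
def attack_monster_alt (attack : Int) (recovery : Int) (hp : Int) : Int :=
  if hp ≤ attack then 1
  else 1 - PySem.Int.floordiv (attack - hp) (attack - recovery)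

-- ===== PRECONDITION & SPEC =====
-- Pre_ excludes exactly the inputs where A's loop never terminates:
-- the first hit does not kill (hp > attack) and the net damage per round is ≤ 0.
def Pre_attack_monster (attack : Int) (recovery : Int) (hp : Int) : Prop :=
  hp ≤ attack ∨ recovery < attack
instance (attack : Int) (recovery : Int) (hp : Int) : Decidable (Pre_attack_monster attack recovery hp) := by unfold Pre_attack_monster; infer_instance

def pvWitness_attack_monster : Int × Int × Int := (5, 2, 20)

def Spec_attack_monster (attack : Int) (recovery : Int) (hp : Int) (out : Int) : Prop := out = attack_monster_alt attack recovery hp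
instance (attack : Int) (recovery : Int) (hp : Int) (out : Int) : Decidable (Spec_attack_monster attack recovery hp out) := by unfold Spec_attack_monster; infer_instance

-- ===== CLAIM (what is proved, stated in full; the proofs are below) =====
def Claim_equal_attack_monster : Prop := ∀ (attack : Int) (recovery : Int) (hp : Int), Dom_attack_monster attack recovery hp → Pre_attack_monster attack recovery hp → Spec_attack_monster attack recovery hp (attack_monster attack recovery hp)

-- ===== LEMMAS AND PROOFS =====

-- One-step loop unfolding.
theorem attackLoopA_succ (attack recovery : Int) (n : Nat) (count hp : Int) :
    attackLoopA attack recovery (n + 1) count hp =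
      if hp - attack ≤ 0 then count + 1
      else attackLoopA attack recovery n (count + 1) (hp - attack + recovery) := by
  simp [attackLoopA]

-- The closed form shifts by one when one net round of damage is applied.
theorem alt_step (attack recovery hp : Int) (hd : recovery < attack) (hhp : attack < hp) :
    attack_monster_alt attack recovery hp =
      1 + attack_monster_alt attack recovery (hp - attack + recovery) := by
  unfold attack_monster_alt
  rw [if_neg (by omega)]
  by_cases h2 : hp - attack + recovery ≤ attack
  · rw [if_pos h2]
    have : PySem.Int.floordiv (attack - hp) (attack - recovery) = -1 := by
      rw [PySem.Int.floordiv_eq_iff_of_pos (by omega)]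
      constructor <;> omega
    omega
  · rw [if_neg h2]
    have : attack - (hp - attack + recovery) = (attack - hp) + 1 * (attack - recovery) := by ring
    rw [this]
    show (1 : Int) - PySem.Int.floordiv _ _ = 1 + (1 - PySem.Int.floordiv _ _)
    unfold PySem.Int.floordiv
    rw [Int.add_mul_fdiv_right _ _ (by omega : attack - recovery ≠ 0)]
    ring

-- Under sufficient fuel the loop computes count + (closed form).
theorem attackLoopA_eq (attack recovery : Int) (hd : recovery < attack) :
    ∀ (n : Nat) (count hp : Int), hp - attack ≤ (n : Int) →
      attackLoopA attack recovery (n + 1) count hp =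
        count + attack_monster_alt attack recovery hp := by
  intro n
  induction n with
  | zero =>
    intro count hp hle
    rw [attackLoopA_succ, if_pos (by omega)]
    unfold attack_monster_alt
    rw [if_pos (by omega)]
  | succ m ih =>
    intro count hp hle
    rw [attackLoopA_succ]
    by_cases h1 : hp - attack ≤ 0
    · rw [if_pos h1]
      unfold attack_monster_alt
      rw [if_pos (by omega)]
    · rw [if_neg h1]
      rw [ih (count + 1) (hp - attack + recovery) (by push_cast at hle ⊢; omega)]
      rw [alt_step attack recovery hp hd (by omega)]
      ring

-- If the first hit kills, the loop returns 1 whatever the fuel beyond the first step.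
theorem attackLoopA_first (attack recovery : Int) (n : Nat) (hp : Int) (h : hp ≤ attack) :
    attackLoopA attack recovery (n + 1) 0 hp = 1 := by
  rw [attackLoopA_succ, if_pos (by omega)]
  norm_num

-- ===== VERDICT (by name: the statement is the Claim_ definition above) =====
theorem attack_monster_spec : Claim_equal_attack_monster := by
  intro attack recovery hp _ hpre
  unfold Spec_attack_monster attack_monster
  rcases hpre with h | h
  · have hfuel : hp.natAbs + attack.natAbs + 2 = (hp.natAbs + attack.natAbs + 1) + 1 := by omega
    rw [hfuel, attackLoopA_first attack recovery _ hp h]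
    unfold attack_monster_alt
    rw [if_pos h]
  · have hfuel : hp.natAbs + attack.natAbs + 2 = (hp.natAbs + attack.natAbs + 1) + 1 := by omega
    rw [hfuel, attackLoopA_eq attack recovery h _ 0 hp]
    · ring
    · omega
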